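-- pv_equiv track=rewrite | github.com/wandb/mcp-server | src/weave_mcp_server/trace_utils.py | get_time_range
-- ===== SOURCE A (Python) =====
-- from typing import Any, Dict, List
--
-- def get_time_range(traces: List[Dict]) -> Dict[str, str]:
--     """Get the time range of traces."""
--     if not traces:
--         return {"earliest": None, "latest": None}
--
--     dates = []
--     for trace in traces:
--         started = trace.get("started_at")
--         ended = trace.get("ended_at")
--         if started:
--             dates.append(started)
--         if ended:
--             dates.append(ended)
--
--     if not dates:
--         return {"earliest": None, "latest": None}
--
--     return {
--         "earliest": min(dates),
--         "latest": max(dates)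
--     }
-- ===== SOURCE B (Python) =====
-- from typing import Any, Dict, List
--
-- def get_time_range(traces: List[Dict]) -> Dict[str, str]:
--     """Get the time range of traces (single pass, running extremes)."""
--     earliest = None
--     latest = None
--     for trace in traces:
--         for v in (trace.get("started_at"), trace.get("ended_at")):
--             if v:
--                 if earliest is None or v < earliest:
--                     earliest = v
--                 if latest is None or latest < v:
--                     latest = v
--     return {"earliest": earliest, "latest": latest}
-- ===== Notes on version B (the rewrite author's own statement) =====
-- stated objective: simpler
-- what changed: Replaces build-a-dates-list-then-min/max (three passes plus two early returns) by a single fold that maintains running earliest/latest accumulators starting at None, so the empty cases fall out naturally.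
import Mathlib
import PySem

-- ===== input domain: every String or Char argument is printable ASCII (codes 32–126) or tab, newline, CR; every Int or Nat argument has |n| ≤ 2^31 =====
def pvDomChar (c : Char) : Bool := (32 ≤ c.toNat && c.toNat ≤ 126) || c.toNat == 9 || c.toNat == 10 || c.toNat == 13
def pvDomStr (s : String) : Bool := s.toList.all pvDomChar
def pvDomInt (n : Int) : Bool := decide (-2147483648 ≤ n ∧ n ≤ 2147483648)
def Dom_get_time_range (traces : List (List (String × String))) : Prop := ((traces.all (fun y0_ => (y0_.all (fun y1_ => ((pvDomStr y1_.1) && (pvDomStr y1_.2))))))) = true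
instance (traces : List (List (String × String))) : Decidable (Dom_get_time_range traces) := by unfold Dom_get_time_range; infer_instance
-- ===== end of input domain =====

-- B replaces A's build-a-dates-list-then-min/max by one fold with running earliest/latest accumulators; same value everywhere.

-- ===== PORT A =====
def get_time_range (traces : List (List (String × String))) : List (String × Option String) :=
  if traces = [] then [("earliest", none), ("latest", none)]
  else
    let dates := traces.foldl (fun acc trace =>
      let started := (PySem.Dict.mk trace).get? "started_at"
      let ended := (PySem.Dict.mk trace).get? "ended_at"
      let acc := match started with
        | some s => if s ≠ "" then acc ++ [s] else acc
        | none => acc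
      match ended with
        | some s => if s ≠ "" then acc ++ [s] else acc
        | none => acc) []
    if dates = [] then [("earliest", none), ("latest", none)]
    else [("earliest", PySem.List.min? dates (fun x => x)),
          ("latest", PySem.List.max? dates (fun x => x))]

-- ===== PORT B =====
-- 'if v:' body of B's inner loop: fold one optional value into the (earliest, latest) pair
def altStep (acc : Option String × Option String) (v : Option String) : Option String × Option String :=
  match v with
  | some s =>
    if s ≠ "" then
      ((match acc.1 with | none => some s | some e => if s < e then some s else some e),
       (match acc.2 with | none => some s | some l => if l < s then some s else some l))
    else acc
  | none => acc

def get_time_range_alt (traces : List (List (String × String))) : List (String × Option String) :=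
  let r := traces.foldl (fun acc trace =>
    altStep (altStep acc ((PySem.Dict.mk trace).get? "started_at"))
            ((PySem.Dict.mk trace).get? "ended_at")) (none, none)
  [("earliest", r.1), ("latest", r.2)]

-- ===== PRECONDITION & SPEC =====
def Spec_get_time_range (traces : List (List (String × String))) (out : List (String × Option String)) : Prop := out = get_time_range_alt traces
instance (traces : List (List (String × String))) (out : List (String × Option String)) : Decidable (Spec_get_time_range traces out) := by unfold Spec_get_time_range; infer_instance

-- ===== CLAIM (what is proved, stated in full; the proofs are below) =====
def Claim_equal_get_time_range : Prop := ∀ (traces : List (List (String × String))), Dom_get_time_range traces → Spec_get_time_range traces (get_time_range traces)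

-- ===== LEMMAS AND PROOFS =====

-- the dates a single trace contributes, in A's order
def contrib (trace : List (String × String)) : List String :=
  (match (PySem.Dict.mk trace).get? "started_at" with
    | some s => if s ≠ "" then [s] else []
    | none => []) ++
  (match (PySem.Dict.mk trace).get? "ended_at" with
    | some s => if s ≠ "" then [s] else []
    | none => [])

-- fold one mandatory date into the pair
def mstep (acc : Option String × Option String) (s : String) : Option String × Option String :=
  ((match acc.1 with | none => some s | some e => if s < e then some s else some e),
   (match acc.2 with | none => some s | some l => if l < s then some s else some l))

lemma datesA_eq_flatMap (traces : List (List (String × String))) (acc : List String) :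
    traces.foldl (fun acc trace =>
      let started := (PySem.Dict.mk trace).get? "started_at"
      let ended := (PySem.Dict.mk trace).get? "ended_at"
      let acc := match started with
        | some s => if s ≠ "" then acc ++ [s] else acc
        | none => acc
      match ended with
        | some s => if s ≠ "" then acc ++ [s] else acc
        | none => acc) acc = acc ++ traces.flatMap contrib := by
  induction traces generalizing acc with
  | nil => simp
  | cons t ts ih =>
    simp only [List.foldl_cons, List.flatMap_cons, ih, contrib]
    cases (PySem.Dict.mk t).get? "started_at" <;>
      cases (PySem.Dict.mk t).get? "ended_at" <;>
      simp <;> split_ifs <;> simp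

lemma altStep_some (acc : Option String × Option String) (s : String) (h : s ≠ "") :
    altStep acc (some s) = mstep acc s := by
  simp [altStep, mstep, h]

lemma altStep_eq_foldl (acc : Option String × Option String) (v : Option String) :
    altStep acc v = (match v with
      | some s => if s ≠ "" then [s] else []
      | none => ([] : List String)).foldl mstep acc := by
  cases v with
  | none => simp [altStep]
  | some s =>
    by_cases h : s = ""
    · simp [altStep, h]
    · simp [altStep_some acc s h, h]

lemma foldB_eq_foldl_dates (traces : List (List (String × String)))
    (acc : Option String × Option String) :
    traces.foldl (fun acc trace =>
      altStep (altStep acc ((PySem.Dict.mk trace).get? "started_at"))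
              ((PySem.Dict.mk trace).get? "ended_at")) acc
      = (traces.flatMap contrib).foldl mstep acc := by
  induction traces generalizing acc with
  | nil => simp
  | cons t ts ih =>
    rw [List.foldl_cons, ih, List.flatMap_cons, List.foldl_append,
      altStep_eq_foldl, altStep_eq_foldl]
    simp only [contrib, List.foldl_append]

lemma mstep_some (t : List String) (e l : String) :
    t.foldl mstep (some e, some l) = (some (t.foldl min e), some (t.foldl max l)) := by
  induction t generalizing e l with
  | nil => rfl
  | cons x xs ih =>
    have h1 : (if x < e then some x else some e) = some (min e x) := by
      split_ifs with h
      · simp [min_eq_right h.le]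
      · simp [min_eq_left (not_lt.mp h)]
    have h2 : (if l < x then some x else some l) = some (max l x) := by
      split_ifs with h
      · simp [max_eq_right h.le]
      · simp [max_eq_left (not_lt.mp h)]
    rw [List.foldl_cons, List.foldl_cons, List.foldl_cons]
    simp only [mstep]
    rw [h1, h2, ih]

lemma foldl_mstep_extrema (dates : List String) :
    dates.foldl mstep (none, none)
      = (PySem.List.min? dates (fun x => x), PySem.List.max? dates (fun x => x)) := by
  cases dates with
  | nil => rfl
  | cons x t =>
    rw [PySem.List.min?_id_cons, PySem.List.max?_id_cons]
    simpa [mstep] using mstep_some t x x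

-- ===== VERDICT (by name: the statement is the Claim_ definition above) =====
theorem get_time_range_spec : Claim_equal_get_time_range := by
  intro traces _
  unfold Spec_get_time_range get_time_range get_time_range_alt
  rw [foldB_eq_foldl_dates, datesA_eq_flatMap, List.nil_append, foldl_mstep_extrema]
  by_cases ht : traces = []
  · subst ht; rfl
  · simp only [ht, if_false]
    by_cases hd : traces.flatMap contrib = []
    · simp [hd, PySem.List.min?, PySem.List.max?]
    · simp [hd]
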